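-- pv_equiv track=rewrite | github.com/tomasfank/programacion-1 | TP_3/ejercicio2.py | matriz_con_escalera
-- ===== SOURCE A (Python) =====
-- def matriz_con_escalera(n):
--     matriz = []
--     for i in range(n):
--         fila = []
--         for j in range(i + 1):
--             fila.append(j + 1)
--         for j in range(i + 1, n):
--             fila.append(0)
--         matriz.append(fila)
--     return matriz
-- ===== SOURCE B (Python) =====
-- def matriz_con_escalera(n):
--     # Preallocate the full zero matrix, then fill only the lower-triangular
--     # staircase entries, column by column (column-first traversal).
--     matriz = [[0] * n for _ in range(n)]
--     for j in range(n):
--         for i in range(j, n):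
--             matriz[i][j] = j + 1
--     return matriz
-- ===== Notes on version B (the rewrite author's own statement) =====
-- stated objective: alternative
-- what changed: B preallocates the n-by-n zero matrix and then fills only the nonzero staircase entries column-first (matriz[i][j] = j+1 for i >= j), instead of A's row-by-row construction by repeated appends.
import Mathlib
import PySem

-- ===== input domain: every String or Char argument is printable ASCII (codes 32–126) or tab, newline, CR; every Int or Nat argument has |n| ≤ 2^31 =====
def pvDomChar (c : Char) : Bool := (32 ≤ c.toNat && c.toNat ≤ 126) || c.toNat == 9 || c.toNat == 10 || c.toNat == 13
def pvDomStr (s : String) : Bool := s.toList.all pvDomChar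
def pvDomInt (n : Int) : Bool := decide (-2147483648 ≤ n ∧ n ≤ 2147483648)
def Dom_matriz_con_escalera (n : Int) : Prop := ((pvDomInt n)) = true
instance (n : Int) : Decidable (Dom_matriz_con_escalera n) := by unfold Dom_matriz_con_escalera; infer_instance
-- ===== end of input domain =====

-- B builds the same staircase matrix by preallocating the zero matrix and filling only
-- the lower-triangular entries column-first, instead of A's row-by-row appends (alternative decomposition).

-- ===== PORT A =====
def matriz_con_escalera (n : Int) : List (List Int) :=
  (PySem.List.pyRange 0 n 1).foldl (fun matriz i =>
    let fila := (PySem.List.pyRange 0 (i + 1) 1).foldl (fun fila j => fila ++ [j + 1]) []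
    let fila := (PySem.List.pyRange (i + 1) n 1).foldl (fun fila _j => fila ++ [(0 : Int)]) fila
    matriz ++ [fila]) []

-- ===== PORT B =====
def matriz_con_escalera_alt (n : Int) : List (List Int) :=
  let matriz := (PySem.List.pyRange 0 n 1).map (fun _ => List.replicate n.toNat (0 : Int))
  (PySem.List.pyRange 0 n 1).foldl (fun m j =>
    (PySem.List.pyRange j n 1).foldl (fun m i =>
      m.modify i.toNat (fun row => row.set j.toNat (j + 1))) m) matriz

-- ===== PRECONDITION & SPEC =====
def Spec_matriz_con_escalera (n : Int) (out : List (List Int)) : Prop := out = matriz_con_escalera_alt n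
instance (n : Int) (out : List (List Int)) : Decidable (Spec_matriz_con_escalera n out) := by unfold Spec_matriz_con_escalera; infer_instance

-- ===== CLAIM (what is proved, stated in full; the proofs are below) =====
def Claim_equal_matriz_con_escalera : Prop := ∀ (n : Int), Dom_matriz_con_escalera n → Spec_matriz_con_escalera n (matriz_con_escalera n)

-- ===== LEMMAS AND PROOFS =====

-- the common closed form: entry (i, c) is c+1 if c ≤ i, else 0 (columns < J filled, for the B invariant)
def pvStair (N J : Nat) : List (List Int) :=
  (List.range N).map (fun i => (List.range N).map (fun c => if c < J ∧ c ≤ i then (c : Int) + 1 else 0))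

lemma pv_range0 (n : Int) :
    PySem.List.pyRange 0 n 1 = (List.range n.toNat).map (fun (k : Nat) => (k : Int)) := by
  rw [PySem.List.pyRange_one]
  have h0 : (n - 0).toNat = n.toNat := by omega
  rw [h0]
  apply List.map_congr_left
  intro k _
  omega

lemma pv_map_range_modify {α : Type} (N k : Nat) (f : Nat → α) (g : α → α) :
    ((List.range N).map f).modify k g
      = (List.range N).map (fun r => if r = k then g (f r) else f r) := by
  apply List.ext_getElem
  · simp
  · intro i h1 h2
    simp only [List.getElem_modify, List.getElem_map, List.getElem_range]
    by_cases h : k = i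
    · simp [h]
    · rw [if_neg h, if_neg (fun h' : i = k => h h'.symm)]

lemma pv_map_range_set (N k : Nat) (f : Nat → Int) (v : Int) :
    ((List.range N).map f).set k v
      = (List.range N).map (fun c => if c = k then v else f c) := by
  apply List.ext_getElem
  · simp
  · intro i h1 h2
    simp only [List.getElem_set, List.getElem_map, List.getElem_range]
    by_cases h : k = i
    · simp [h]
    · rw [if_neg h, if_neg (fun h' : i = k => h h'.symm)]

-- one column fill as a pointwise update, for any nodup list of row indices
lemma pv_foldl_modify (upd : List Int → List Int) :
    ∀ (ks : List Nat) (N : Nat) (f : Nat → List Int), ks.Nodup →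
      ks.foldl (fun m i => m.modify i upd) ((List.range N).map f)
        = (List.range N).map (fun r => if r ∈ ks then upd (f r) else f r) := by
  intro ks
  induction ks with
  | nil => intro N f _; simp
  | cons k ks ih =>
    intro N f hnd
    have hk : k ∉ ks := (List.nodup_cons.mp hnd).1
    have hnd' : ks.Nodup := (List.nodup_cons.mp hnd).2
    simp only [List.foldl_cons]
    rw [pv_map_range_modify, ih N _ hnd']
    apply List.map_congr_left
    intro r _
    by_cases hr : r = k
    · subst hr; simp [hk]
    · simp [hr]

-- the inner Python loop `for i in range(j, n)` over a range-shaped matrix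
lemma pv_inner_fill (n : Int) (jn : Nat) (f : Nat → List Int) :
    (PySem.List.pyRange (jn : Int) n 1).foldl
        (fun m i => m.modify i.toNat (fun row => row.set jn ((jn : Int) + 1)))
        ((List.range n.toNat).map f)
      = (List.range n.toNat).map
          (fun r => if jn ≤ r then (f r).set jn ((jn : Int) + 1) else f r) := by
  have hfold :
      (PySem.List.pyRange (jn : Int) n 1).foldl
          (fun m i => m.modify i.toNat (fun row => row.set jn ((jn : Int) + 1)))
          ((List.range n.toNat).map f)
        = ((PySem.List.pyRange (jn : Int) n 1).map Int.toNat).foldl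
            (fun m i => m.modify i (fun row => row.set jn ((jn : Int) + 1)))
            ((List.range n.toNat).map f) := by
    rw [List.foldl_map]
  rw [hfold]
  have hks : (PySem.List.pyRange (jn : Int) n 1).map Int.toNat
      = (List.range (n.toNat - jn)).map (fun k => jn + k) := by
    rw [PySem.List.pyRange_one]
    rw [List.map_map]
    have hlen : (n - (jn : Int)).toNat = n.toNat - jn := by omega
    rw [hlen]
    apply List.map_congr_left
    intro k _
    show ((jn : Int) + (k : Int)).toNat = jn + k
    omega
  rw [hks]
  have hnd : ((List.range (n.toNat - jn)).map (fun k => jn + k)).Nodup := by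
    exact List.Nodup.map (fun a b h => by omega) List.nodup_range
  rw [pv_foldl_modify _ _ _ _ hnd]
  apply List.map_congr_left
  intro r hr
  have hrN : r < n.toNat := List.mem_range.mp hr
  have hmem : (r ∈ (List.range (n.toNat - jn)).map (fun k => jn + k)) ↔ jn ≤ r := by
    simp only [List.mem_map, List.mem_range]
    constructor
    · rintro ⟨k, _, rfl⟩; omega
    · intro h; exact ⟨r - jn, by omega, by omega⟩
  by_cases h : jn ≤ r
  · rw [if_pos (hmem.mpr h), if_pos h]
  · rw [if_neg (fun hm => h (hmem.mp hm)), if_neg h]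

-- the outer Python loop `for j in range(n)`, after J columns processed
lemma pv_outer_fill (n : Int) :
    ∀ (J : Nat), J ≤ n.toNat →
      (List.range J).foldl
          (fun (m : List (List Int)) (jn : Nat) =>
            (PySem.List.pyRange (jn : Int) n 1).foldl
              (fun m i => m.modify i.toNat (fun row => row.set jn ((jn : Int) + 1))) m)
          (pvStair n.toNat 0)
        = pvStair n.toNat J := by
  intro J
  induction J with
  | zero => intro _; simp
  | succ J ih =>
    intro hJ
    rw [List.range_succ, List.foldl_append]
    rw [ih (by omega)]
    simp only [List.foldl_cons, List.foldl_nil]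
    unfold pvStair
    rw [pv_inner_fill]
    apply List.map_congr_left
    intro r hr
    by_cases h : J ≤ r
    · rw [if_pos h, pv_map_range_set]
      apply List.map_congr_left
      intro c hc
      by_cases hcJ : c = J
      · subst hcJ
        simp [h]
      · have hiff : (c < J ∧ c ≤ r) ↔ (c < J + 1 ∧ c ≤ r) := by omega
        simp [hcJ, hiff]
    · rw [if_neg h]
      apply List.map_congr_left
      intro c hc
      have hiff : (c < J ∧ c ≤ r) ↔ (c < J + 1 ∧ c ≤ r) := by omega
      simp [hiff]

-- B equals the closed form
lemma pv_b_eq (n : Int) : matriz_con_escalera_alt n = pvStair n.toNat n.toNat := by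
  unfold matriz_con_escalera_alt
  rw [pv_range0]
  have hinit : ((List.range n.toNat).map (fun (k : Nat) => (k : Int))).map
      (fun _ => List.replicate n.toNat (0 : Int))
      = pvStair n.toNat 0 := by
    unfold pvStair
    rw [List.map_map]
    apply List.map_congr_left
    intro i _
    show List.replicate n.toNat (0 : Int)
        = (List.range n.toNat).map (fun c => if c < 0 ∧ c ≤ i then (c : Int) + 1 else 0)
    have h1 : (List.range n.toNat).map (fun c => if c < 0 ∧ c ≤ i then (c : Int) + 1 else 0)
        = (List.range n.toNat).map (fun _ => (0 : Int)) := by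
      apply List.map_congr_left; intro c _; simp
    rw [h1, List.map_const']
    simp
  rw [hinit, List.foldl_map]
  have hgoal := pv_outer_fill n n.toNat (le_refl _)
  simp only [Int.toNat_natCast] at hgoal ⊢
  exact hgoal

-- A equals the closed form
lemma pv_a_eq (n : Int) : matriz_con_escalera n = pvStair n.toNat n.toNat := by
  unfold matriz_con_escalera
  simp only [PySem.List.foldl_append_singleton_eq_map, List.nil_append]
  rw [pv_range0, List.map_map]
  unfold pvStair
  apply List.map_congr_left
  intro i hi
  have hiN : i < n.toNat := List.mem_range.mp hi
  show (PySem.List.pyRange 0 ((i : Int) + 1) 1).map (fun j => j + 1)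
        ++ (PySem.List.pyRange ((i : Int) + 1) n 1).map (fun _ => (0 : Int))
      = (List.range n.toNat).map (fun c => if c < n.toNat ∧ c ≤ i then (c : Int) + 1 else 0)
  have hleft : (PySem.List.pyRange 0 ((i : Int) + 1) 1).map (fun j => j + 1)
      = (List.range (i + 1)).map (fun (k : Nat) => (k : Int) + 1) := by
    rw [PySem.List.pyRange_one, List.map_map]
    have h1 : ((i : Int) + 1 - 0).toNat = i + 1 := by omega
    rw [h1]
    apply List.map_congr_left
    intro k _
    show (0 : Int) + (k : Int) + 1 = (k : Int) + 1
    omega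
  have hright : (PySem.List.pyRange ((i : Int) + 1) n 1).map (fun _ => (0 : Int))
      = List.replicate (n.toNat - (i + 1)) (0 : Int) := by
    rw [PySem.List.pyRange_one]
    have hm : (n - ((i : Int) + 1)).toNat = n.toNat - (i + 1) := by omega
    rw [hm, List.map_map]
    have hcomp : ((fun _ : Int => (0 : Int)) ∘ (fun (k : Nat) => ((i : Int) + 1) + (k : Int)))
        = (fun _ : Nat => (0 : Int)) := rfl
    rw [hcomp, List.map_const', List.length_range]
  rw [hleft, hright]
  apply List.ext_getElem
  · simp only [List.length_append, List.length_map, List.length_range, List.length_replicate]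
    omega
  · intro k h1 h2
    have hkN : k < n.toNat := by simpa using h2
    rw [List.getElem_append]
    by_cases hk : k < i + 1
    · rw [dif_pos (by simpa using hk)]
      simp only [List.getElem_map, List.getElem_range]
      have hc : k < n.toNat ∧ k ≤ i := ⟨hkN, by omega⟩
      rw [if_pos hc]
    · rw [dif_neg (by simpa using hk)]
      simp only [List.length_map, List.length_range]
      rw [List.getElem_replicate, List.getElem_map, List.getElem_range]
      have hc : ¬ (k < n.toNat ∧ k ≤ i) := by omega
      rw [if_neg hc]

-- ===== VERDICT (by name: the statement is the Claim_ definition above) =====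
theorem matriz_con_escalera_spec : Claim_equal_matriz_con_escalera := by
  intro n _
  unfold Spec_matriz_con_escalera
  rw [pv_a_eq, pv_b_eq]
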